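-- pv_equiv track=rewrite | github.com/alirezamirrokni/Diversity-aware-Inference-time-Search-via-Critical-tokens | src/methods/ours.py | find_proper_noun_token_ranges
-- ===== SOURCE A (Python) =====
-- from typing import Any, Dict, List, Tuple
--
-- def find_proper_noun_token_ranges(generated_tokens: List[str], proper_nouns: List[str]) -> Dict[str, List[int]]:
--     # Map each proper noun span to the list of token indices that overlap it (char-based alignment).
--     results: Dict[str, List[int]] = {}
--
--     text_so_far = ""
--     char_to_token: Dict[int, int] = {}
--     current_pos = 0
--
--     for token_idx, token in enumerate(generated_tokens):
--         start = current_pos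
--         end = current_pos + len(token)
--
--         for char_pos in range(start, end):
--             char_to_token[char_pos] = token_idx
--
--         current_pos = end
--         text_so_far += token
--
--     for proper_noun in proper_nouns:
--         start_char = text_so_far.find(proper_noun)
--         if start_char == -1:
--             results[proper_noun] = []
--             continue
--
--         end_char = start_char + len(proper_noun)
--         contributing_tokens = set()
--
--         for char_pos in range(start_char, end_char):
--             if char_pos in char_to_token:
--                 contributing_tokens.add(char_to_token[char_pos])
--
--         results[proper_noun] = sorted(contributing_tokens)
--
--     return results
-- ===== SOURCE B (Python) =====
-- from typing import Dict, List
--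
--
-- def _bisect_right(arr, x):
--     lo, hi = 0, len(arr)
--     while lo < hi:
--         mid = (lo + hi) // 2
--         if x < arr[mid]:
--             hi = mid
--         else:
--             lo = mid + 1
--     return lo
--
--
-- def _bisect_left(arr, x):
--     lo, hi = 0, len(arr)
--     while lo < hi:
--         mid = (lo + hi) // 2
--         if arr[mid] < x:
--             lo = mid + 1
--         else:
--             hi = mid
--     return lo
--
--
-- def find_proper_noun_token_ranges(generated_tokens: List[str], proper_nouns: List[str]) -> Dict[str, List[int]]:
--     # Token start/end offset arrays once; per noun, binary search for the range of
--     # overlapping tokens (no per-character dict, no set, no sort).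
--     text = "".join(generated_tokens)
--     starts: List[int] = []
--     ends: List[int] = []
--     pos = 0
--     for tok in generated_tokens:
--         starts.append(pos)
--         pos += len(tok)
--         ends.append(pos)
--     results: Dict[str, List[int]] = {}
--     for pn in proper_nouns:
--         a = text.find(pn)
--         if a == -1:
--             results[pn] = []
--         else:
--             b = a + len(pn)
--             lo = _bisect_right(ends, a)
--             hi = _bisect_left(starts, b)
--             results[pn] = [i for i in range(lo, hi) if starts[i] < ends[i]]
--     return results
-- ===== Notes on version B (the rewrite author's own statement) =====
-- stated objective: alternative
-- what changed: Replaces A's per-character position-to-token dict, per-character set collection and final sort with token start/end offset arrays and a per-noun binary search (hand-written bisect) for the range of overlapping tokens (no per-character dict, no set, no sort).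
import Mathlib
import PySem

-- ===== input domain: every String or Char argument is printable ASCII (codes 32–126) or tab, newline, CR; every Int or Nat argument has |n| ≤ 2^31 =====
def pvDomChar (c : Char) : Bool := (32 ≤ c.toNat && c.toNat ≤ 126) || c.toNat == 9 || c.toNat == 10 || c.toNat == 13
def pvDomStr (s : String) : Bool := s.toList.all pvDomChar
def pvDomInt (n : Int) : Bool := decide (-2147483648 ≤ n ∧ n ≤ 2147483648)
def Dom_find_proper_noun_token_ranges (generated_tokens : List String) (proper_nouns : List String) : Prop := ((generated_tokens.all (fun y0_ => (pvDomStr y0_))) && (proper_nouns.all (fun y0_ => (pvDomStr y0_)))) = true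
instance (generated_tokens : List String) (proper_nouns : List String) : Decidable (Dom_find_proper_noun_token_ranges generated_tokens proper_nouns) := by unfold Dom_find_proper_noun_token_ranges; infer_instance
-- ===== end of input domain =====

-- B replaces A's per-character dict / set / sort with token start/end offset arrays and a
-- per-noun binary search for the overlapping token range (alternative algorithm; equal results proved).

-- ===== PORT A =====
def find_proper_noun_token_ranges (generated_tokens : List String) (proper_nouns : List String) : List (String × List Int) :=
  let st := (PySem.List.enumerate generated_tokens 0).foldl
      (fun (st : PySem.Dict Int Int × Int × List Char) p =>
        let start := st.2.1
        let stop := start + (PySem.Str.len p.2 : Int)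
        let d := (PySem.List.pyRange start stop 1).foldl (fun d c => d.insert c p.1) st.1
        (d, stop, st.2.2 ++ p.2.toList))
      (PySem.Dict.empty, 0, [])
  let char_to_token := st.1
  let text_so_far := st.2.2
  let results := proper_nouns.foldl
      (fun (results : PySem.Dict String (List Int)) pn =>
        let start_char := PySem.Chars.find text_so_far pn.toList
        if start_char = -1 then results.insert pn []
        else
          let end_char := start_char + (PySem.Str.len pn : Int)
          let contributing := (PySem.List.pyRange start_char end_char 1).foldl
              (fun (s : PySem.Set Int) c =>
                if char_to_token.contains c then PySem.Set.add s (char_to_token.getD c 0) else s)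
              PySem.Set.empty
          results.insert pn (PySem.List.sorted contributing (fun x => x) false))
      PySem.Dict.empty
  results.items

-- ===== PORT B =====
-- B-side helpers: the hand-written binary searches of Source B (while-loops as tail recursion).
def pvBisectRightLoop (arr : List Int) (x : Int) (lo hi : Int) : Int :=
  if _h : lo < hi then
    if x < PySem.List.pyGetD arr (PySem.Int.floordiv (lo + hi) 2) 0 then
      pvBisectRightLoop arr x lo (PySem.Int.floordiv (lo + hi) 2)
    else
      pvBisectRightLoop arr x (PySem.Int.floordiv (lo + hi) 2 + 1) hi
  else lo
termination_by (hi - lo).toNat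
decreasing_by
  · have _h1 := PySem.Int.floordiv_two_mid_bounds (le_of_lt _h)
    have h2 : PySem.Int.floordiv (lo + hi) 2 < hi := by
      rw [PySem.Int.floordiv_lt_iff_lt_mul (by omega)]
      omega
    omega
  · have _h1 := PySem.Int.floordiv_two_mid_bounds (le_of_lt _h)
    omega

def pvBisectRight (arr : List Int) (x : Int) : Int :=
  pvBisectRightLoop arr x 0 (arr.length : Int)

def pvBisectLeftLoop (arr : List Int) (x : Int) (lo hi : Int) : Int :=
  if _h : lo < hi then
    if PySem.List.pyGetD arr (PySem.Int.floordiv (lo + hi) 2) 0 < x then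
      pvBisectLeftLoop arr x (PySem.Int.floordiv (lo + hi) 2 + 1) hi
    else
      pvBisectLeftLoop arr x lo (PySem.Int.floordiv (lo + hi) 2)
  else lo
termination_by (hi - lo).toNat
decreasing_by
  · have _h1 := PySem.Int.floordiv_two_mid_bounds (le_of_lt _h)
    omega
  · have _h1 := PySem.Int.floordiv_two_mid_bounds (le_of_lt _h)
    have h2 : PySem.Int.floordiv (lo + hi) 2 < hi := by
      rw [PySem.Int.floordiv_lt_iff_lt_mul (by omega)]
      omega
    omega

def pvBisectLeft (arr : List Int) (x : Int) : Int :=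
  pvBisectLeftLoop arr x 0 (arr.length : Int)

def find_proper_noun_token_ranges_alt (generated_tokens : List String) (proper_nouns : List String) : List (String × List Int) :=
  let text := PySem.Str.join "" generated_tokens
  let se := generated_tokens.foldl
      (fun (st : List Int × List Int × Int) tok =>
        (st.1 ++ [st.2.2], st.2.1 ++ [st.2.2 + (PySem.Str.len tok : Int)],
          st.2.2 + (PySem.Str.len tok : Int)))
      ([], [], 0)
  let starts := se.1
  let ends := se.2.1
  let results := proper_nouns.foldl
      (fun (results : PySem.Dict String (List Int)) pn =>
        let a := PySem.Str.find text pn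
        if a = -1 then results.insert pn []
        else
          let b := a + (PySem.Str.len pn : Int)
          let lo := pvBisectRight ends a
          let hi := pvBisectLeft starts b
          results.insert pn
            ((PySem.List.pyRange lo hi 1).filter
              (fun i => decide (PySem.List.pyGetD starts i 0 < PySem.List.pyGetD ends i 0))))
      PySem.Dict.empty
  results.items

-- ===== PRECONDITION & SPEC =====
def Spec_find_proper_noun_token_ranges (generated_tokens : List String) (proper_nouns : List String) (out : List (String × List Int)) : Prop := out = find_proper_noun_token_ranges_alt generated_tokens proper_nouns
instance (generated_tokens : List String) (proper_nouns : List String) (out : List (String × List Int)) : Decidable (Spec_find_proper_noun_token_ranges generated_tokens proper_nouns out) := by unfold Spec_find_proper_noun_token_ranges; infer_instance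

-- ===== CLAIM (what is proved, stated in full; the proofs are below) =====
def Claim_equal_find_proper_noun_token_ranges : Prop := ∀ (generated_tokens : List String) (proper_nouns : List String), Dom_find_proper_noun_token_ranges generated_tokens proper_nouns → Spec_find_proper_noun_token_ranges generated_tokens proper_nouns (find_proper_noun_token_ranges generated_tokens proper_nouns)

-- ===== LEMMAS AND PROOFS =====

-- Proof-side helpers: the owner function, A's dict builder, B's span list, in recursive form.
def pvLen (s : String) : Int := (PySem.Str.len s : Int)

def pvOwner : List String → Int → Int → Int → Option Int
  | [], _, _, _ => none
  | tok :: rest, i, pos, p =>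
    if pos ≤ p ∧ p < pos + pvLen tok then some i
    else pvOwner rest (i + 1) (pos + pvLen tok) p

def pvDict : List String → Int → Int → PySem.Dict Int Int → PySem.Dict Int Int
  | [], _, _, d => d
  | tok :: rest, i, pos, d =>
    pvDict rest (i + 1) (pos + pvLen tok)
      ((PySem.List.pyRange pos (pos + pvLen tok) 1).foldl (fun d c => d.insert c i) d)

def pvSpans : List String → Int → List (Int × Int)
  | [], _ => []
  | tok :: rest, pos => (pos, pos + pvLen tok) :: pvSpans rest (pos + pvLen tok)

lemma pvLen_nonneg (s : String) : 0 ≤ pvLen s := by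
  simp [pvLen]

-- A's first loop computes pvDict, the total length, and the concatenated text.
lemma pvA_loop1 (toks : List String) : ∀ (i pos : Int) (d : PySem.Dict Int Int) (t : List Char),
    (PySem.List.enumerate toks i).foldl
      (fun (st : PySem.Dict Int Int × Int × List Char) p =>
        ((PySem.List.pyRange st.2.1 (st.2.1 + (PySem.Str.len p.2 : Int)) 1).foldl
            (fun d c => d.insert c p.1) st.1,
          st.2.1 + (PySem.Str.len p.2 : Int), st.2.2 ++ p.2.toList))
      (d, pos, t)
    = (pvDict toks i pos d, pos + ((toks.map pvLen).sum), t ++ (toks.map String.toList).flatten) := by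
  induction toks with
  | nil => intro i pos d t; simp [PySem.List.enumerate_nil, pvDict]
  | cons tok rest ih =>
    intro i pos d t
    rw [PySem.List.enumerate_cons]
    simp only [List.foldl_cons]
    rw [ih]
    simp [pvDict, pvLen, add_assoc]

-- Lookup in a range-insert loop.
lemma pvR (i : Int) : ∀ (n : Nat) (s e : Int), (e - s).toNat = n → ∀ (d : PySem.Dict Int Int) (p : Int),
    ((PySem.List.pyRange s e 1).foldl (fun d c => d.insert c i) d).get? p
    = if s ≤ p ∧ p < e then some i else d.get? p := by
  intro n
  induction n with
  | zero =>
    intro s e h d p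
    rw [PySem.List.pyRange_one_eq_nil (by omega)]
    simp only [List.foldl_nil]
    rw [if_neg (by omega)]
  | succ n ih =>
    intro s e h d p
    have hse : s < e := by omega
    rw [PySem.List.pyRange_one_cons hse]
    simp only [List.foldl_cons]
    rw [ih (s + 1) e (by omega)]
    rw [PySem.Dict.get?_insert]
    split_ifs <;> first | rfl | omega

lemma pvOwner_le {toks : List String} : ∀ {i pos p t : Int}, pvOwner toks i pos p = some t → pos ≤ p := by
  induction toks with
  | nil => intro i pos p t h; simp [pvOwner] at h
  | cons tok rest ih =>
    intro i pos p t h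
    simp only [pvOwner] at h
    split at h
    · next hc => exact hc.1
    · next hc =>
      have h1 := ih h
      have h2 := pvLen_nonneg tok
      omega

-- Lookup in A's dict is the owner function.
lemma pvDict_get? (toks : List String) : ∀ (i pos : Int) (d : PySem.Dict Int Int) (p : Int),
    (pvDict toks i pos d).get? p
    = match pvOwner toks i pos p with
      | some t => some t
      | none => d.get? p := by
  induction toks with
  | nil => intro i pos d p; simp [pvDict, pvOwner]
  | cons tok rest ih =>
    intro i pos d p
    simp only [pvDict, pvOwner]
    rw [ih]
    rw [pvR i (pos + pvLen tok - pos).toNat pos (pos + pvLen tok) rfl]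
    by_cases hc : pos ≤ p ∧ p < pos + pvLen tok
    · rw [if_pos hc]
      cases hrest : pvOwner rest (i + 1) (pos + pvLen tok) p with
      | none => simp [hc]
      | some t =>
        have := pvOwner_le hrest
        omega
    · rw [if_neg hc, if_neg hc]

-- B's offsets loop computes the firsts and seconds of pvSpans.
lemma pvB_bounds (toks : List String) : ∀ (pos : Int) (accS accE : List Int),
    toks.foldl (fun (st : List Int × List Int × Int) tok =>
        (st.1 ++ [st.2.2], st.2.1 ++ [st.2.2 + (PySem.Str.len tok : Int)],
          st.2.2 + (PySem.Str.len tok : Int)))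
      (accS, accE, pos)
    = (accS ++ (pvSpans toks pos).map (fun p => p.1), accE ++ (pvSpans toks pos).map (fun p => p.2),
        pos + ((toks.map pvLen).sum)) := by
  induction toks with
  | nil => intro pos accS accE; simp [pvSpans]
  | cons tok rest ih =>
    intro pos accS accE
    simp only [List.foldl_cons]
    rw [ih]
    simp [pvSpans, pvLen, add_assoc]

lemma pvSpans_ge (toks : List String) : ∀ (pos : Int) (p : Int × Int), p ∈ pvSpans toks pos → pos ≤ p.1 := by
  induction toks with
  | nil => intro pos p h; simp [pvSpans] at h
  | cons tok rest ih =>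
    intro pos p h
    simp only [pvSpans, List.mem_cons] at h
    rcases h with h | h
    · subst h; exact le_refl _
    · have h1 := ih (pos + pvLen tok) p h
      have h2 := pvLen_nonneg tok
      omega

lemma pvSpans_snd_ge (toks : List String) : ∀ (pos : Int) (p : Int × Int), p ∈ pvSpans toks pos → p.1 ≤ p.2 := by
  induction toks with
  | nil => intro pos p h; simp [pvSpans] at h
  | cons tok rest ih =>
    intro pos p h
    simp only [pvSpans, List.mem_cons] at h
    rcases h with h | h
    · subst h; have := pvLen_nonneg tok; simpa using this
    · exact ih (pos + pvLen tok) p h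

lemma pvSpans_pairwise (toks : List String) : ∀ (pos : Int),
    (pvSpans toks pos).Pairwise (fun p q => p.1 ≤ q.1 ∧ p.2 ≤ q.2) := by
  induction toks with
  | nil => intro pos; simp [pvSpans]
  | cons tok rest ih =>
    intro pos
    simp only [pvSpans]
    refine List.Pairwise.cons ?_ (ih _)
    intro q hq
    have h1 := pvSpans_ge rest (pos + pvLen tok) q hq
    have h2 := pvSpans_snd_ge rest (pos + pvLen tok) q hq
    have h3 := pvLen_nonneg tok
    constructor <;> simp <;> omega

lemma pvBisectRightLoop_bounds (arr : List Int) (x : Int) : ∀ (n : Nat) (lo hi : Int),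
    (hi - lo).toNat ≤ n → lo ≤ hi →
    lo ≤ pvBisectRightLoop arr x lo hi ∧ pvBisectRightLoop arr x lo hi ≤ hi := by
  intro n
  induction n with
  | zero =>
    intro lo hi h hle
    rw [pvBisectRightLoop, dif_neg (by omega)]
    omega
  | succ n ih =>
    intro lo hi h hle
    rw [pvBisectRightLoop]
    by_cases hlt : lo < hi
    · rw [dif_pos hlt]
      have hm := PySem.Int.floordiv_two_mid_bounds (le_of_lt hlt)
      have hm2 : PySem.Int.floordiv (lo + hi) 2 < hi := by
        rw [PySem.Int.floordiv_lt_iff_lt_mul (by omega)]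
        omega
      split_ifs with hx
      · have := ih lo (PySem.Int.floordiv (lo + hi) 2) (by omega) (by omega)
        omega
      · have := ih (PySem.Int.floordiv (lo + hi) 2 + 1) hi (by omega) (by omega)
        omega
    · rw [dif_neg hlt]
      omega

lemma pvBisectLeftLoop_bounds (arr : List Int) (x : Int) : ∀ (n : Nat) (lo hi : Int),
    (hi - lo).toNat ≤ n → lo ≤ hi →
    lo ≤ pvBisectLeftLoop arr x lo hi ∧ pvBisectLeftLoop arr x lo hi ≤ hi := by
  intro n
  induction n with
  | zero =>
    intro lo hi h hle
    rw [pvBisectLeftLoop, dif_neg (by omega)]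
    omega
  | succ n ih =>
    intro lo hi h hle
    rw [pvBisectLeftLoop]
    by_cases hlt : lo < hi
    · rw [dif_pos hlt]
      have hm := PySem.Int.floordiv_two_mid_bounds (le_of_lt hlt)
      have hm2 : PySem.Int.floordiv (lo + hi) 2 < hi := by
        rw [PySem.Int.floordiv_lt_iff_lt_mul (by omega)]
        omega
      split_ifs with hx
      · have := ih (PySem.Int.floordiv (lo + hi) 2 + 1) hi (by omega) (by omega)
        omega
      · have := ih lo (PySem.Int.floordiv (lo + hi) 2) (by omega) (by omega)
        omega
    · rw [dif_neg hlt]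
      omega

-- bisect_right on a nondecreasing array: index below the result iff the entry is ≤ x.
lemma pvBisectRightLoop_correct (arr : List Int) (x : Int)
    (hmono : ∀ (k j : Nat), k ≤ j → j < arr.length → arr.getD k 0 ≤ arr.getD j 0) :
    ∀ (n : Nat) (lo hi : Int), (hi - lo).toNat ≤ n → 0 ≤ lo → lo ≤ hi → hi ≤ (arr.length : Int) →
    (∀ (k : Nat), k < arr.length → ((k : Int) < lo → arr.getD k 0 ≤ x) ∧ (hi ≤ (k : Int) → x < arr.getD k 0)) →
    ∀ (k : Nat), k < arr.length → ((k : Int) < pvBisectRightLoop arr x lo hi ↔ arr.getD k 0 ≤ x) := by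
  intro n
  induction n with
  | zero =>
    intro lo hi h h0 hle hlen hb k hk
    rw [pvBisectRightLoop, dif_neg (by omega)]
    constructor
    · exact (hb k hk).1
    · intro hx
      by_contra hnk
      have := (hb k hk).2 (by omega)
      omega
  | succ n ih =>
    intro lo hi h h0 hle hlen hb k hk
    rw [pvBisectRightLoop]
    by_cases hlt : lo < hi
    · rw [dif_pos hlt]
      have hm := PySem.Int.floordiv_two_mid_bounds (le_of_lt hlt)
      have hm2 : PySem.Int.floordiv (lo + hi) 2 < hi := by
        rw [PySem.Int.floordiv_lt_iff_lt_mul (by omega)]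
        omega
      have hmidget : PySem.List.pyGetD arr (PySem.Int.floordiv (lo + hi) 2) 0
          = arr.getD (PySem.Int.floordiv (lo + hi) 2).toNat 0 :=
        PySem.List.pyGetD_of_nonneg arr 0 (by omega)
      split_ifs with hx
      · refine ih lo (PySem.Int.floordiv (lo + hi) 2) (by omega) h0 (by omega) (by omega) ?_ k hk
        intro k' hk'
        refine ⟨(hb k' hk').1, ?_⟩
        intro hge
        have hmon := hmono (PySem.Int.floordiv (lo + hi) 2).toNat k' (by omega) hk'
        rw [hmidget] at hx
        omega
      · refine ih (PySem.Int.floordiv (lo + hi) 2 + 1) hi (by omega) (by omega) (by omega) hlen ?_ k hk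
        intro k' hk'
        refine ⟨?_, (hb k' hk').2⟩
        intro hlt'
        have hmon := hmono k' (PySem.Int.floordiv (lo + hi) 2).toNat (by omega) (by omega)
        rw [hmidget] at hx
        omega
    · rw [dif_neg hlt]
      constructor
      · exact (hb k hk).1
      · intro hx
        by_contra hnk
        have := (hb k hk).2 (by omega)
        omega

-- bisect_left on a nondecreasing array: index below the result iff the entry is < x.
lemma pvBisectLeftLoop_correct (arr : List Int) (x : Int)
    (hmono : ∀ (k j : Nat), k ≤ j → j < arr.length → arr.getD k 0 ≤ arr.getD j 0) :
    ∀ (n : Nat) (lo hi : Int), (hi - lo).toNat ≤ n → 0 ≤ lo → lo ≤ hi → hi ≤ (arr.length : Int) →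
    (∀ (k : Nat), k < arr.length → ((k : Int) < lo → arr.getD k 0 < x) ∧ (hi ≤ (k : Int) → x ≤ arr.getD k 0)) →
    ∀ (k : Nat), k < arr.length → ((k : Int) < pvBisectLeftLoop arr x lo hi ↔ arr.getD k 0 < x) := by
  intro n
  induction n with
  | zero =>
    intro lo hi h h0 hle hlen hb k hk
    rw [pvBisectLeftLoop, dif_neg (by omega)]
    constructor
    · exact (hb k hk).1
    · intro hx
      by_contra hnk
      have := (hb k hk).2 (by omega)
      omega
  | succ n ih =>
    intro lo hi h h0 hle hlen hb k hk
    rw [pvBisectLeftLoop]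
    by_cases hlt : lo < hi
    · rw [dif_pos hlt]
      have hm := PySem.Int.floordiv_two_mid_bounds (le_of_lt hlt)
      have hm2 : PySem.Int.floordiv (lo + hi) 2 < hi := by
        rw [PySem.Int.floordiv_lt_iff_lt_mul (by omega)]
        omega
      have hmidget : PySem.List.pyGetD arr (PySem.Int.floordiv (lo + hi) 2) 0
          = arr.getD (PySem.Int.floordiv (lo + hi) 2).toNat 0 :=
        PySem.List.pyGetD_of_nonneg arr 0 (by omega)
      split_ifs with hx
      · refine ih (PySem.Int.floordiv (lo + hi) 2 + 1) hi (by omega) (by omega) (by omega) hlen ?_ k hk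
        intro k' hk'
        refine ⟨?_, (hb k' hk').2⟩
        intro hlt'
        have hmon := hmono k' (PySem.Int.floordiv (lo + hi) 2).toNat (by omega) (by omega)
        rw [hmidget] at hx
        omega
      · refine ih lo (PySem.Int.floordiv (lo + hi) 2) (by omega) h0 (by omega) (by omega) ?_ k hk
        intro k' hk'
        refine ⟨(hb k' hk').1, ?_⟩
        intro hge
        have hmon := hmono (PySem.Int.floordiv (lo + hi) 2).toNat k' (by omega) hk'
        rw [hmidget] at hx
        omega
    · rw [dif_neg hlt]
      constructor
      · exact (hb k hk).1
      · intro hx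
        by_contra hnk
        have := (hb k hk).2 (by omega)
        omega

-- B's per-noun bisect-and-filter list equals the interval-overlap filter over all spans.
lemma pvBval (toks : List String) (a b : Int) :
    (PySem.List.pyRange (pvBisectRight ((pvSpans toks 0).map (fun p => p.2)) a)
        (pvBisectLeft ((pvSpans toks 0).map (fun p => p.1)) b) 1).filter
      (fun i => decide (PySem.List.pyGetD ((pvSpans toks 0).map (fun p => p.1)) i 0
          < PySem.List.pyGetD ((pvSpans toks 0).map (fun p => p.2)) i 0))
    = ((PySem.List.enumerate (pvSpans toks 0)).filter
        (fun p => decide (p.2.1 < p.2.2) && decide (p.2.1 < b) && decide (a < p.2.2))).map (fun p => p.1) := by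
  have hlenS : ((pvSpans toks 0).map (fun p => p.1)).length = (pvSpans toks 0).length := List.length_map ..
  have hlenE : ((pvSpans toks 0).map (fun p => p.2)).length = (pvSpans toks 0).length := List.length_map ..
  have hS1 : ∀ (k : Nat), k < (pvSpans toks 0).length →
      ((pvSpans toks 0).map (fun p => p.1)).getD k 0 = ((pvSpans toks 0).getD k (0, 0)).1 := by
    intro k hk
    rw [List.getD_eq_getElem _ _ (by omega), List.getD_eq_getElem _ _ hk]
    simp
  have hS2 : ∀ (k : Nat), k < (pvSpans toks 0).length →
      ((pvSpans toks 0).map (fun p => p.2)).getD k 0 = ((pvSpans toks 0).getD k (0, 0)).2 := by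
    intro k hk
    rw [List.getD_eq_getElem _ _ (by omega), List.getD_eq_getElem _ _ hk]
    simp
  have hpw := pvSpans_pairwise toks 0
  rw [List.pairwise_iff_getElem] at hpw
  have hmonoS : ∀ (k j : Nat), k ≤ j → j < ((pvSpans toks 0).map (fun p => p.1)).length →
      ((pvSpans toks 0).map (fun p => p.1)).getD k 0 ≤ ((pvSpans toks 0).map (fun p => p.1)).getD j 0 := by
    intro k j hkj hj
    rcases eq_or_lt_of_le hkj with rfl | hlt
    · exact le_refl _
    · have hj' : j < (pvSpans toks 0).length := by omega
      have hk' : k < (pvSpans toks 0).length := by omega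
      have hh := hpw k j hk' hj' hlt
      rw [hS1 k hk', hS1 j hj', List.getD_eq_getElem _ _ hk', List.getD_eq_getElem _ _ hj']
      exact hh.1
  have hmonoE : ∀ (k j : Nat), k ≤ j → j < ((pvSpans toks 0).map (fun p => p.2)).length →
      ((pvSpans toks 0).map (fun p => p.2)).getD k 0 ≤ ((pvSpans toks 0).map (fun p => p.2)).getD j 0 := by
    intro k j hkj hj
    rcases eq_or_lt_of_le hkj with rfl | hlt
    · exact le_refl _
    · have hj' : j < (pvSpans toks 0).length := by omega
      have hk' : k < (pvSpans toks 0).length := by omega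
      have hh := hpw k j hk' hj' hlt
      rw [hS2 k hk', hS2 j hj', List.getD_eq_getElem _ _ hk', List.getD_eq_getElem _ _ hj']
      exact hh.2
  have hloB := pvBisectRightLoop_bounds ((pvSpans toks 0).map (fun p => p.2)) a
      ((pvSpans toks 0).map (fun p => p.2)).length 0 (((pvSpans toks 0).map (fun p => p.2)).length : Int)
      (by omega) (by omega)
  have hhiB := pvBisectLeftLoop_bounds ((pvSpans toks 0).map (fun p => p.1)) b
      ((pvSpans toks 0).map (fun p => p.1)).length 0 (((pvSpans toks 0).map (fun p => p.1)).length : Int)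
      (by omega) (by omega)
  have hlo := pvBisectRightLoop_correct ((pvSpans toks 0).map (fun p => p.2)) a hmonoE
      ((pvSpans toks 0).map (fun p => p.2)).length 0 (((pvSpans toks 0).map (fun p => p.2)).length : Int)
      (by omega) (by omega) (by omega) (by omega)
      (fun k hk => ⟨fun h => absurd h (by omega), fun h => absurd h (by omega)⟩)
  have hhi := pvBisectLeftLoop_correct ((pvSpans toks 0).map (fun p => p.1)) b hmonoS
      ((pvSpans toks 0).map (fun p => p.1)).length 0 (((pvSpans toks 0).map (fun p => p.1)).length : Int)
      (by omega) (by omega) (by omega) (by omega)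
      (fun k hk => ⟨fun h => absurd h (by omega), fun h => absurd h (by omega)⟩)
  simp only [pvBisectRight, pvBisectLeft]
  simp only [List.length_map] at hloB hhiB hlo hhi ⊢
  refine PySem.List.eq_of_perm_of_pairwise_le_of_injective (fun x => x) (fun _ _ h => h) ?_ ?_ ?_
  · refine (List.perm_ext_iff_of_nodup ?_ ?_).2 ?_
    · exact ((PySem.List.pairwise_lt_pyRange_one _ _).filter _).imp (fun h => ne_of_lt h)
    · exact (List.pairwise_map.2 ((PySem.List.pairwise_lt_enumerate _ _).filter _)).imp (fun h => ne_of_lt h)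
    · intro z
      constructor
      · intro hz
        rcases List.mem_filter.1 hz with ⟨hzr, hcond⟩
        rcases PySem.List.mem_pyRange_one.1 hzr with ⟨hzlo, hzhi⟩
        have hz0 : 0 ≤ z := by have := hloB.1; omega
        have hkS : z.toNat < (pvSpans toks 0).length := by have := hhiB.2; omega
        rw [PySem.List.pyGetD_of_nonneg _ _ hz0, PySem.List.pyGetD_of_nonneg _ _ hz0,
            hS1 _ hkS, hS2 _ hkS] at hcond
        have hcond' := of_decide_eq_true hcond
        have h2 : ((pvSpans toks 0).map (fun p => p.1)).getD z.toNat 0 < b := by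
          rw [← hhi z.toNat (by omega)]
          omega
        rw [hS1 _ hkS] at h2
        have h3 : a < ((pvSpans toks 0).map (fun p => p.2)).getD z.toNat 0 := by
          by_contra hno
          have := (hlo z.toNat (by omega)).2 (by omega)
          omega
        rw [hS2 _ hkS] at h3
        refine List.mem_map.2 ⟨((0 : Int) + z.toNat, (pvSpans toks 0)[z.toNat]), ?_, by simp; omega⟩
        refine List.mem_filter.2 ⟨(PySem.List.mem_enumerate_iff _ _ _).2 ⟨z.toNat, hkS, rfl⟩, ?_⟩
        rw [List.getD_eq_getElem _ _ hkS] at hcond' h2 h3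
        simp only [Bool.and_eq_true, decide_eq_true_eq]
        exact ⟨⟨hcond', h2⟩, h3⟩
      · intro hz
        rcases List.mem_map.1 hz with ⟨p, hpf, rfl⟩
        rcases List.mem_filter.1 hpf with ⟨hpe, hcond⟩
        rcases (PySem.List.mem_enumerate_iff _ _ _).1 hpe with ⟨k, hkS, rfl⟩
        simp only [Bool.and_eq_true, decide_eq_true_eq] at hcond
        obtain ⟨⟨hse, hsb⟩, hae⟩ := hcond
        have hget1 : ((pvSpans toks 0).map (fun p => p.1)).getD k 0 = (pvSpans toks 0)[k].1 := by
          rw [hS1 _ hkS, List.getD_eq_getElem _ _ hkS]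
        have hget2 : ((pvSpans toks 0).map (fun p => p.2)).getD k 0 = (pvSpans toks 0)[k].2 := by
          rw [hS2 _ hkS, List.getD_eq_getElem _ _ hkS]
        have hklo : ¬ ((k : Int) < pvBisectRightLoop ((pvSpans toks 0).map (fun p => p.2)) a 0
            ((pvSpans toks 0).length : Int)) := by
          rw [hlo k (by omega)]
          omega
        have hkhi : (k : Int) < pvBisectLeftLoop ((pvSpans toks 0).map (fun p => p.1)) b 0
            ((pvSpans toks 0).length : Int) := by
          rw [hhi k (by omega)]
          omega
        refine List.mem_filter.2 ⟨PySem.List.mem_pyRange_one.2 ⟨by simp; omega, by simpa using hkhi⟩, ?_⟩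
        have hk0 : (0 : Int) ≤ (0 : Int) + (k : Int) := by omega
        rw [PySem.List.pyGetD_of_nonneg _ _ hk0, PySem.List.pyGetD_of_nonneg _ _ hk0]
        have htn : ((0 : Int) + (k : Int)).toNat = k := by omega
        rw [htn]
        simp only [decide_eq_true_eq]
        omega
  · exact ((PySem.List.pairwise_lt_pyRange_one _ _).filter _).imp (fun h => le_of_lt h)
  · exact (List.pairwise_map.2 ((PySem.List.pairwise_lt_enumerate _ _).filter _)).imp (fun h => le_of_lt h)

-- Adding the same element repeatedly to a set that already holds it does nothing.
lemma pvS1 (cs : List Int) (i : Int) : ∀ (st : PySem.Set Int), i ∈ st →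
    cs.foldl (fun (s : PySem.Set Int) _ => PySem.Set.add s i) st = st := by
  induction cs with
  | nil => intro st _; rfl
  | cons c rest ih =>
    intro st h
    simp only [List.foldl_cons]
    rw [PySem.Set.add_of_mem h]
    exact ih st h

-- Core lemma: the per-character owner-collecting loop equals the interval-overlap filter.
lemma pvCore (toks : List String) : ∀ (i pos a b : Int) (st : PySem.Set Int),
    pos ≤ a → a < b → (∀ x ∈ st, x < i) →
    (PySem.List.pyRange a b 1).foldl
      (fun (s : PySem.Set Int) c =>
        match pvOwner toks i pos c with
        | some t => PySem.Set.add s t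
        | none => s) st
    = st ++ ((PySem.List.enumerate (pvSpans toks pos) i).filter
        (fun p => decide (p.2.1 < p.2.2) && decide (p.2.1 < b) && decide (a < p.2.2))).map (fun p => p.1) := by
  induction toks with
  | nil =>
    intro i pos a b st hpos hab hst
    simp [pvOwner, pvSpans, PySem.List.enumerate_nil]
  | cons tok rest ih =>
    intro i pos a b st hpos hab hst
    have hlen := pvLen_nonneg tok
    by_cases hcase : pos + pvLen tok ≤ a
    · -- first token ends at or before a: it is skipped on both sides
      have hcongr : (PySem.List.pyRange a b 1).foldl
          (fun (s : PySem.Set Int) c =>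
            match pvOwner (tok :: rest) i pos c with
            | some t => PySem.Set.add s t
            | none => s) st
          = (PySem.List.pyRange a b 1).foldl
          (fun (s : PySem.Set Int) c =>
            match pvOwner rest (i + 1) (pos + pvLen tok) c with
            | some t => PySem.Set.add s t
            | none => s) st := by
        apply PySem.List.foldl_congr_mem
        intro acc x hx
        have hx' := (PySem.List.mem_pyRange_one).1 hx
        simp only [pvOwner]
        rw [if_neg (by omega)]
      rw [hcongr, ih (i + 1) (pos + pvLen tok) a b st (by omega) hab
            (fun x hx => by have := hst x hx; omega)]
      simp only [pvSpans, PySem.List.enumerate_cons, List.filter_cons]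
      have hno : ¬ a < pos + pvLen tok := by omega
      simp [hno]
    · rw [not_le] at hcase
      have hi : i ∉ st := fun h => absurd (hst i h) (by omega)
      by_cases hb : b ≤ pos + pvLen tok
      · -- the whole span [a, b) lies inside the first token
        have hcongr : (PySem.List.pyRange a b 1).foldl
            (fun (s : PySem.Set Int) c =>
              match pvOwner (tok :: rest) i pos c with
              | some t => PySem.Set.add s t
              | none => s) st
            = (PySem.List.pyRange a b 1).foldl
            (fun (s : PySem.Set Int) _ => PySem.Set.add s i) st := by
          apply PySem.List.foldl_congr_mem
          intro acc x hx
          have hx' := (PySem.List.mem_pyRange_one).1 hx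
          simp only [pvOwner]
          rw [if_pos (by omega)]
        rw [hcongr, PySem.List.pyRange_one_cons hab]
        simp only [List.foldl_cons]
        rw [PySem.Set.add_of_not_mem hi]
        rw [pvS1 _ i (st ++ [i]) (by simp)]
        -- right-hand side: head is kept, the rest of the filter is empty
        simp only [pvSpans, PySem.List.enumerate_cons, List.filter_cons]
        have hyes : (decide (pos < pos + pvLen tok) && decide (pos < b) && decide (a < pos + pvLen tok)) = true := by
          simp only [Bool.and_eq_true, decide_eq_true_eq]
          omega
        rw [hyes]
        have hrest : ((PySem.List.enumerate (pvSpans rest (pos + pvLen tok)) (i + 1)).filter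
            (fun p => decide (p.2.1 < p.2.2) && decide (p.2.1 < b) && decide (a < p.2.2))) = [] := by
          rw [List.filter_eq_nil_iff]
          intro p hp
          have hp2 : p.2 ∈ pvSpans rest (pos + pvLen tok) := by
            rcases (PySem.List.mem_enumerate_iff _ _ _).1 hp with ⟨k, hk, rfl⟩
            exact List.getElem_mem hk
          have := pvSpans_ge rest (pos + pvLen tok) p.2 hp2
          simp only [Bool.and_eq_true, decide_eq_true_eq]
          intro h'
          omega
        rw [hrest]
        simp
      · rw [not_le] at hb
        -- span splits at the end of the first token
        rw [PySem.List.pyRange_one_append a (pos + pvLen tok) b (by omega) (by omega)]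
        rw [List.foldl_append]
        have hcongr1 : (PySem.List.pyRange a (pos + pvLen tok) 1).foldl
            (fun (s : PySem.Set Int) c =>
              match pvOwner (tok :: rest) i pos c with
              | some t => PySem.Set.add s t
              | none => s) st
            = (PySem.List.pyRange a (pos + pvLen tok) 1).foldl
            (fun (s : PySem.Set Int) _ => PySem.Set.add s i) st := by
          apply PySem.List.foldl_congr_mem
          intro acc x hx
          have hx' := (PySem.List.mem_pyRange_one).1 hx
          simp only [pvOwner]
          rw [if_pos (by omega)]
        rw [hcongr1, PySem.List.pyRange_one_cons hcase]
        simp only [List.foldl_cons]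
        rw [PySem.Set.add_of_not_mem hi]
        rw [pvS1 _ i (st ++ [i]) (by simp)]
        have hcongr2 : (PySem.List.pyRange (pos + pvLen tok) b 1).foldl
            (fun (s : PySem.Set Int) c =>
              match pvOwner (tok :: rest) i pos c with
              | some t => PySem.Set.add s t
              | none => s) (st ++ [i])
            = (PySem.List.pyRange (pos + pvLen tok) b 1).foldl
            (fun (s : PySem.Set Int) c =>
              match pvOwner rest (i + 1) (pos + pvLen tok) c with
              | some t => PySem.Set.add s t
              | none => s) (st ++ [i]) := by
          apply PySem.List.foldl_congr_mem
          intro acc x hx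
          have hx' := (PySem.List.mem_pyRange_one).1 hx
          simp only [pvOwner]
          rw [if_neg (by omega)]
        rw [hcongr2]
        rw [ih (i + 1) (pos + pvLen tok) (pos + pvLen tok) b (st ++ [i]) (le_refl _) hb
              (fun x hx => by
                rcases List.mem_append.1 hx with h | h
                · have := hst x h; omega
                · simp at h; omega)]
        simp only [pvSpans, PySem.List.enumerate_cons, List.filter_cons]
        have hyes : (decide (pos < pos + pvLen tok) && decide (pos < b) && decide (a < pos + pvLen tok)) = true := by
          simp only [Bool.and_eq_true, decide_eq_true_eq]
          omega
        rw [hyes]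
        have hfil : ∀ p ∈ PySem.List.enumerate (pvSpans rest (pos + pvLen tok)) (i + 1),
            (decide (p.2.1 < p.2.2) && decide (p.2.1 < b) && decide (pos + pvLen tok < p.2.2))
            = (decide (p.2.1 < p.2.2) && decide (p.2.1 < b) && decide (a < p.2.2)) := by
          intro p hp
          have hp2 : p.2 ∈ pvSpans rest (pos + pvLen tok) := by
            rcases (PySem.List.mem_enumerate_iff _ _ _).1 hp with ⟨k, hk, rfl⟩
            exact List.getElem_mem hk
          have hge := pvSpans_ge rest (pos + pvLen tok) p.2 hp2
          by_cases h1 : p.2.1 < p.2.2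
          · have h2 : pos + pvLen tok < p.2.2 := by omega
            have h3 : a < p.2.2 := by omega
            simp [h1, h2, h3]
          · simp [h1]
        rw [List.filter_congr hfil]
        simp

-- ===== VERDICT (by name: the statement is the Claim_ definition above) =====
lemma pvJoin (ps : List (List Char)) : PySem.Chars.join [] ps = ps.flatten := by
  induction ps with
  | nil => rfl
  | cons x rest ih =>
    cases rest with
    | nil => simp [PySem.Chars.join_singleton]
    | cons y t => rw [PySem.Chars.join_cons_cons, List.flatten_cons]; simp_all

theorem find_proper_noun_token_ranges_spec : Claim_equal_find_proper_noun_token_ranges := by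
  intro toks pns _hdom
  unfold Spec_find_proper_noun_token_ranges
  simp only [find_proper_noun_token_ranges, find_proper_noun_token_ranges_alt]
  rw [pvA_loop1 toks 0 0 PySem.Dict.empty [], pvB_bounds toks 0 []]
  simp only [List.nil_append]
  have htext : (PySem.Str.join "" toks).toList = (List.map String.toList toks).flatten := by
    rw [PySem.Str.toList_join]
    exact pvJoin _
  simp only [PySem.Str.find_eq, htext]
  congr 1
  apply PySem.List.foldl_congr_mem
  intro results pn _
  by_cases hfind : PySem.Chars.find (List.map String.toList toks).flatten pn.toList = -1
  · simp [hfind]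
  · rw [if_neg hfind, if_neg hfind]
    congr 1
    have ha : 0 ≤ PySem.Chars.find (List.map String.toList toks).flatten pn.toList := by
      have := PySem.Chars.neg_one_le_find (List.map String.toList toks).flatten pn.toList
      omega
    have hget : ∀ c, (pvDict toks 0 0 PySem.Dict.empty).get? c = pvOwner toks 0 0 c := by
      intro c
      rw [pvDict_get?]
      cases pvOwner toks 0 0 c <;> simp
    have hbody : (fun (s : PySem.Set Int) c =>
        if (pvDict toks 0 0 PySem.Dict.empty).contains c = true then
          s.add ((pvDict toks 0 0 PySem.Dict.empty).getD c 0) else s)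
        = (fun (s : PySem.Set Int) c =>
            match pvOwner toks 0 0 c with
            | some t => s.add t
            | none => s) := by
      funext s c
      rw [PySem.Dict.contains_eq_isSome_get?, PySem.Dict.getD_eq_get?_getD, hget c]
      cases pvOwner toks 0 0 c <;> simp
    rw [hbody]
    refine Eq.trans ?_ (pvBval toks (PySem.Chars.find (List.map String.toList toks).flatten pn.toList)
      (PySem.Chars.find (List.map String.toList toks).flatten pn.toList + PySem.Str.len pn)).symm
    by_cases hemp : pn.toList = []
    · have hl : (PySem.Str.len pn : Int) = 0 := by
        simp [PySem.Str.len_eq, hemp]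
      have ha0 : PySem.Chars.find (List.map String.toList toks).flatten pn.toList = 0 := by
        rw [hemp]
        exact PySem.Chars.find_nil _
      rw [ha0, hl]
      rw [PySem.List.pyRange_one_eq_nil (by omega)]
      simp only [List.foldl_nil]
      have hrest : ((PySem.List.enumerate (pvSpans toks 0)).filter
          (fun p => decide (p.2.1 < p.2.2) && decide (p.2.1 < (0 : Int) + 0) && decide ((0 : Int) < p.2.2))) = [] := by
        rw [List.filter_eq_nil_iff]
        intro p hp
        have hp2 : p.2 ∈ pvSpans toks 0 := by
          rcases (PySem.List.mem_enumerate_iff _ _ _).1 hp with ⟨k, hk, rfl⟩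
          exact List.getElem_mem hk
        have := pvSpans_ge toks 0 p.2 hp2
        simp only [Bool.and_eq_true, decide_eq_true_eq]
        intro h'
        omega
      rw [hrest]
      simp [PySem.List.sorted]
    · have hl : 0 < (PySem.Str.len pn : Int) := by
        simp only [PySem.Str.len_eq]
        have : pn.toList.length ≠ 0 := fun h => hemp (List.length_eq_zero_iff.1 h)
        omega
      rw [pvCore toks 0 0 _ _ PySem.Set.empty ha (by omega) (by simp [PySem.Set.empty])]
      simp only [PySem.Set.empty, List.nil_append]
      refine PySem.List.sorted_eq_of_perm_of_pairwise_lt _ _ _ (List.Perm.refl _) ?_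
      exact List.pairwise_map.2 ((PySem.List.pairwise_lt_enumerate _ _).filter _)
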